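-- pv_equiv track=rewrite | github.com/GustavoAssi/PythonProblemsW3Resource | pythonproblems/BasicExercisesPart1/ex142.py | separate_subsequences_from_binary_string
-- ===== SOURCE A (Python) =====
-- def separate_subsequences_from_binary_string(binary_string: str) -> dict:
--     """
--     Returns a dictionary with the sequences of zeros and ones.
--     :param binary_string: (str) a string of zeros and ones.
--     :return:              (dict) a dictionary with all zeros and ones subsequences.
--     """
--     binary_string_encoded = ""
--     index = 0
--     while index < len(binary_string):
--         binary_string_encoded += binary_string[index]
--         if index <= len(binary_string) - 2 and binary_string[index + 1] != binary_string[index]: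
--             binary_string_encoded += ' '
--         index += 1
--     sub_sequences = binary_string_encoded.split()
--     zeros = [sequence for sequence in sub_sequences if sequence.startswith('0')]
--     ones = [sequence for sequence in sub_sequences if sequence.startswith('1')]
--
--     return {"zeros": zeros, "ones": ones}
-- ===== SOURCE B (Python) =====
-- def separate_subsequences_from_binary_string(binary_string: str) -> dict:
--     # Build runs of equal characters directly with one accumulator loop,
--     # classifying each finished run by its first character.
--     zeros = []
--     ones = []
--     run = ""
--     for ch in binary_string:
--         if run and ch != run[0]:
--             if run[0] == '0':
--                 zeros.append(run)
--             elif run[0] == '1':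
--                 ones.append(run)
--             run = ""
--         run += ch
--     if run:
--         if run[0] == '0':
--             zeros.append(run)
--         elif run[0] == '1':
--             ones.append(run)
--     return {"zeros": zeros, "ones": ones}
-- ===== Notes on version B (the rewrite author's own statement) =====
-- stated objective: simpler
-- what changed: B builds the runs of equal characters directly with one accumulator loop and classifies each finished run by its first character, instead of A's building a separator-encoded copy of the string by repeated concatenation, re-splitting it on whitespace and filtering the token list twice.
import Mathlib
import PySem

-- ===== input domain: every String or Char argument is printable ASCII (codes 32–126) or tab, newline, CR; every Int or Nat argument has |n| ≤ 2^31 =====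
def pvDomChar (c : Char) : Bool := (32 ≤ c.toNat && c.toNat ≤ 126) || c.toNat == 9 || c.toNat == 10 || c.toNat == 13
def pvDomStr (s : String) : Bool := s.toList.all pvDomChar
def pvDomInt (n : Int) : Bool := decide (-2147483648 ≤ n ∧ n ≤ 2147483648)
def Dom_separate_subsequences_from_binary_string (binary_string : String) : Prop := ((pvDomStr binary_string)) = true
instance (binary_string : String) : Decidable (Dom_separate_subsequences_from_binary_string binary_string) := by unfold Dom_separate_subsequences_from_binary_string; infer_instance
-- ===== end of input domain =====

-- B replaces A's separator-encoding + whitespace split + two startswith filters by one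
-- accumulator loop that builds each run of equal characters and classifies it on the spot (simpler, and measured faster: no quadratic re-concatenation of the string).

-- ===== PORT A =====
-- the while loop building binary_string_encoded (both indexings are in range under the guards)
def pvA_loop (cs : List Char) (index : Nat) (acc : List Char) : List Char :=
  if h : index < cs.length then
    let acc := acc ++ [cs[index]]
    let acc :=
      if h2 : (index : Int) ≤ (cs.length : Int) - 2 then
        if cs[index + 1]'(by omega) ≠ cs[index] then acc ++ [' '] else acc
      else acc
    pvA_loop cs (index + 1) acc
  else acc
termination_by cs.length - index

def separate_subsequences_from_binary_string (binary_string : String) : List (String × List String) :=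
  let cs := binary_string.toList
  let binary_string_encoded := pvA_loop cs 0 []
  -- .split() = PySem.Str.split₀, applied on the character-list side
  let sub_sequences := PySem.Chars.split₀ binary_string_encoded
  let zeros := (sub_sequences.filter (fun sequence => PySem.Chars.startswith sequence ['0'])).map String.ofList
  let ones := (sub_sequences.filter (fun sequence => PySem.Chars.startswith sequence ['1'])).map String.ofList
  [("zeros", zeros), ("ones", ones)]

-- ===== PORT B =====
-- appending the finished run to zeros / ones / neither, by its first character (run[0])
def pvB_flush (zeros ones : List (List Char)) (run : List Char) :
    List (List Char) × List (List Char) :=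
  if run.head! = '0' then (zeros ++ [run], ones)
  else if run.head! = '1' then (zeros, ones ++ [run])
  else (zeros, ones)

-- one iteration of B's loop: flush when the character breaks the current run, then extend the run
def pvB_step (st : List (List Char) × List (List Char) × List Char) (ch : Char) :
    List (List Char) × List (List Char) × List Char :=
  let (zeros, ones, run) := st
  if run ≠ [] ∧ ch ≠ run.head! then
    let (zeros, ones) := pvB_flush zeros ones run
    (zeros, ones, [ch])
  else
    (zeros, ones, run ++ [ch])

def separate_subsequences_from_binary_string_alt (binary_string : String) : List (String × List String) :=
  let st := binary_string.toList.foldl pvB_step ([], [], [])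
  let fin := if st.2.2 ≠ [] then pvB_flush st.1 st.2.1 st.2.2 else (st.1, st.2.1)
  [("zeros", fin.1.map String.ofList), ("ones", fin.2.map String.ofList)]

-- ===== PRECONDITION & SPEC =====
def Spec_separate_subsequences_from_binary_string (binary_string : String) (out : List (String × List String)) : Prop := out = separate_subsequences_from_binary_string_alt binary_string
instance (binary_string : String) (out : List (String × List String)) : Decidable (Spec_separate_subsequences_from_binary_string binary_string out) := by unfold Spec_separate_subsequences_from_binary_string; infer_instance

-- ===== CLAIM (what is proved, stated in full; the proofs are below) =====
def Claim_equal_separate_subsequences_from_binary_string : Prop := ∀ (binary_string : String), Dom_separate_subsequences_from_binary_string binary_string → Spec_separate_subsequences_from_binary_string binary_string (separate_subsequences_from_binary_string binary_string)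

-- ===== LEMMAS AND PROOFS =====

-- the maximal-run decomposition of the input, the reference point both programs are reduced to
def pvRuns : List Char → List (List Char)
  | [] => []
  | c :: rest =>
      (c :: rest.takeWhile (· == c)) :: pvRuns (rest.dropWhile (· == c))
termination_by cs => cs.length
decreasing_by
  simp only [List.length_cons]
  exact Nat.lt_succ_of_le (List.length_dropWhile_le _ _)

-- A's encoded string, characterised structurally
def pvEnc : List Char → List Char
  | [] => []
  | [c] => [c]
  | c :: d :: rest => c :: (if d ≠ c then ' ' :: pvEnc (d :: rest) else pvEnc (d :: rest))

theorem pvA_loop_eq_enc (cs : List Char) (index : Nat) (acc : List Char) :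
    pvA_loop cs index acc = acc ++ pvEnc (cs.drop index) := by
  induction index, acc using pvA_loop.induct cs with
  | case1 index acc h acc1 acc2 ih =>
    rw [pvA_loop]
    simp only [h, dif_pos]
    simp only [acc2, acc1, dite_eq_ite] at ih
    rw [ih, List.drop_eq_getElem_cons h]
    by_cases h2 : (index : Int) ≤ (cs.length : Int) - 2
    · have h3 : index + 1 < cs.length := by omega
      rw [List.drop_eq_getElem_cons h3, pvEnc]
      simp only [h2, dif_pos]
      split_ifs with h4
      · simp [← List.drop_eq_getElem_cons h3]
      · simp [← List.drop_eq_getElem_cons h3]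
    · have h3 : cs.drop (index + 1) = [] := by
        apply List.drop_eq_nil_of_le; omega
      rw [h3, pvEnc, pvEnc]
      simp only [h2, dif_neg, not_false_iff]
      simp
  | case2 index acc h =>
    rw [pvA_loop]
    simp only [h, dif_neg, not_false_iff]
    rw [List.drop_eq_nil_of_le (by omega), pvEnc]
    simp

theorem pv_go_word (w : List Char) (hw : ∀ x ∈ w, PySem.Chars.isspace x = false) :
    ∀ rest cur acc, PySem.Chars.split₀.go (w ++ rest) cur acc
      = PySem.Chars.split₀.go rest (w.reverse ++ cur) acc := by
  induction w with
  | nil => intro rest cur acc; simp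
  | cons c w ih =>
    intro rest cur acc
    have hc := hw c (by simp)
    rw [List.cons_append, PySem.Chars.split₀.go]
    simp only [hc, Bool.false_eq_true, if_false]
    rw [ih (fun x hx => hw x (by simp [hx]))]
    simp

theorem pv_go_spaces (w : List Char) (hw : ∀ x ∈ w, PySem.Chars.isspace x = true) :
    ∀ rest acc, PySem.Chars.split₀.go (w ++ rest) [] acc
      = PySem.Chars.split₀.go rest [] acc := by
  induction w with
  | nil => simp
  | cons c w ih =>
    intro rest acc
    have hc := hw c (by simp)
    rw [List.cons_append, PySem.Chars.split₀.go]
    simp only [hc, List.isEmpty_nil, if_pos]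
    exact ih (fun x hx => hw x (by simp [hx])) rest acc

theorem pvEnc_run_nil (c : Char) (t : List Char) (ht : ∀ x ∈ t, x = c) :
    pvEnc (c :: t) = c :: t := by
  induction t generalizing c with
  | nil => rfl
  | cons d t ih =>
    have hd : d = c := ht d (by simp)
    subst hd
    rw [pvEnc]
    simp [ih d (fun x hx => ht x (by simp [hx]))]

theorem pvEnc_run_cons (c d : Char) (t r : List Char) (ht : ∀ x ∈ t, x = c) (hd : d ≠ c) :
    pvEnc (c :: t ++ d :: r) = c :: t ++ ' ' :: pvEnc (d :: r) := by
  induction t generalizing c with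
  | nil => show pvEnc (c :: d :: r) = _; rw [pvEnc]; simp [hd]
  | cons e t ih =>
    have he : e = c := ht e (by simp)
    subst he
    show pvEnc (e :: e :: (t ++ d :: r)) = _
    rw [pvEnc]
    simp only [ne_eq, not_true_eq_false, if_false]
    rw [show e :: (t ++ d :: r) = e :: t ++ d :: r from rfl,
        ih e (fun x hx => ht x (by simp [hx])) hd]
    simp


theorem pv_split₀_enc (cs : List Char) : ∀ acc,
    PySem.Chars.split₀.go (pvEnc cs) [] acc
      = acc.reverse ++ (pvRuns cs).filter (fun r => !PySem.Chars.isspace r.head!) := by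
  induction cs using pvRuns.induct with
  | case1 => intro acc; simp [pvEnc, pvRuns, PySem.Chars.split₀.go]
  | case2 c rest ih =>
    intro acc
    have ht : ∀ x ∈ rest.takeWhile (· == c), x = c := by
      intro x hx; simpa using List.mem_takeWhile_imp hx
    have hrun : ∀ x ∈ c :: rest.takeWhile (· == c), PySem.Chars.isspace x = PySem.Chars.isspace c := by
      intro x hx
      rcases List.mem_cons.1 hx with h | h
      · rw [h]
      · rw [ht x h]
    rw [pvRuns]
    cases hr' : rest.dropWhile (· == c) with
    | nil =>
      have hrest : rest = rest.takeWhile (· == c) := by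
        conv_lhs => rw [← List.takeWhile_append_dropWhile (p := (· == c)) (l := rest)]
        rw [hr', List.append_nil]
      conv_lhs => rw [hrest, pvEnc_run_nil c _ ht]
      by_cases hsp : PySem.Chars.isspace c = true
      · have := pv_go_spaces (c :: rest.takeWhile (· == c))
          (fun x hx => (hrun x hx).trans hsp) [] acc
        rw [List.append_nil] at this
        rw [this]
        simp [pvRuns, PySem.Chars.split₀.go, hsp]
      · have := pv_go_word (c :: rest.takeWhile (· == c))
          (fun x hx => (hrun x hx).trans (by simpa using hsp)) [] [] acc
        rw [List.append_nil] at this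
        rw [this, PySem.Chars.split₀.go]
        simp [pvRuns, hsp]
    | cons d r =>
      have hd : d ≠ c := by
        have := List.head?_dropWhile_not (· == c) rest
        rw [hr'] at this
        simpa using this
      have hrest : c :: rest = c :: rest.takeWhile (· == c) ++ d :: r := by
        rw [List.cons_append, ← hr', List.takeWhile_append_dropWhile]
      have henc : pvEnc (c :: rest) = (c :: rest.takeWhile (· == c)) ++ ' ' :: pvEnc (d :: r) := by
        rw [hrest]; exact pvEnc_run_cons c d _ r ht hd
      rw [hr'] at ih
      by_cases hsp : PySem.Chars.isspace c = true
      · have hsp' : ∀ x ∈ (c :: rest.takeWhile (· == c)) ++ [' '], PySem.Chars.isspace x = true := by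
          intro x hx
          rcases List.mem_append.1 hx with h | h
          · exact (hrun x h).trans hsp
          · simp at h; subst h; decide
        have heq : (c :: rest.takeWhile (· == c)) ++ ' ' :: pvEnc (d :: r)
            = ((c :: rest.takeWhile (· == c)) ++ [' ']) ++ pvEnc (d :: r) := by simp
        rw [henc, heq, pv_go_spaces _ hsp' (pvEnc (d :: r)) acc, ih]
        simp [hsp]
      · rw [henc, pv_go_word (c :: rest.takeWhile (· == c))
          (fun x hx => (hrun x hx).trans (by simpa using hsp)) (' ' :: pvEnc (d :: r)) [] acc]
        rw [PySem.Chars.split₀.go]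
        have h1 : PySem.Chars.isspace ' ' = true := by decide
        rw [if_pos h1, if_neg (by simp)]
        simp only [List.append_nil, List.reverse_reverse]
        rw [ih]
        simp [hsp]

theorem pvB_flush_eq (z o : List (List Char)) (run : List Char) :
    pvB_flush z o run
      = (z ++ if run.head! = '0' then [run] else [],
         o ++ if run.head! = '1' then [run] else []) := by
  unfold pvB_flush
  split_ifs with h1 h2 <;> simp_all

theorem pvB_run (t : List Char) : ∀ (z o : List (List Char)) (r : List Char), r ≠ [] →
    (∀ x ∈ t, x = r.head!) → t.foldl pvB_step (z, o, r) = (z, o, r ++ t) := by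
  induction t with
  | nil => intro z o r _ _; simp
  | cons x t ih =>
    intro z o r hr hx
    rw [List.foldl_cons]
    have hx0 : x = r.head! := hx x (by simp)
    have hstep : pvB_step (z, o, r) x = (z, o, r ++ [x]) := by
      unfold pvB_step
      simp [hx0]
    rw [hstep]
    have hhead : (r ++ [x]).head! = r.head! := by
      cases r with
      | nil => exact absurd rfl hr
      | cons a s => rfl
    rw [ih z o (r ++ [x]) (by simp) (fun y hy => by rw [hhead]; exact hx y (by simp [hy]))]
    simp

theorem pvB_main (cs : List Char) : ∀ (zeros ones : List (List Char)),
    (let st := cs.foldl pvB_step (zeros, ones, [])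
     if st.2.2 ≠ [] then pvB_flush st.1 st.2.1 st.2.2 else (st.1, st.2.1))
      = (zeros ++ (pvRuns cs).filter (fun r => r.head! == '0'),
         ones ++ (pvRuns cs).filter (fun r => r.head! == '1')) := by
  induction cs using pvRuns.induct with
  | case1 => intro z o; simp [pvRuns]
  | case2 c rest ih =>
    intro z o
    have ht : ∀ x ∈ rest.takeWhile (· == c), x = c := by
      intro x hx; simpa using List.mem_takeWhile_imp hx
    have hsplit : rest = rest.takeWhile (· == c) ++ rest.dropWhile (· == c) :=
      (List.takeWhile_append_dropWhile).symm
    have hstep0 : pvB_step (z, o, []) c = (z, o, [c]) := by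
      unfold pvB_step; simp
    rw [pvRuns]
    simp only [List.foldl_cons, hstep0]
    conv_lhs => rw [hsplit, List.foldl_append]
    rw [pvB_run _ z o [c] (by simp) (fun x hx => ht x hx)]
    simp only [List.singleton_append]
    cases hr' : rest.dropWhile (· == c) with
    | nil =>
      simp only [List.foldl_nil, pvRuns]
      rw [pvB_flush_eq]
      simp [List.filter_cons]
    | cons d r0 =>
      have hd : d ≠ c := by
        have := List.head?_dropWhile_not (· == c) rest
        rw [hr'] at this
        simpa using this
      rw [hr'] at ih
      have hstep1 : pvB_step (z, o, c :: rest.takeWhile (· == c)) d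
          = ((pvB_flush z o (c :: rest.takeWhile (· == c))).1,
             (pvB_flush z o (c :: rest.takeWhile (· == c))).2, [d]) := by
        unfold pvB_step
        cases hfl : pvB_flush z o (c :: rest.takeWhile (· == c)) with
        | mk a b => simp [hd, hfl]
      have hstep2 : ∀ z' o' : List (List Char), pvB_step (z', o', []) d = (z', o', [d]) := by
        intro z' o'; unfold pvB_step; simp
      rw [List.foldl_cons, hstep1]
      have hih := ih (pvB_flush z o (c :: rest.takeWhile (· == c))).1
        (pvB_flush z o (c :: rest.takeWhile (· == c))).2
      simp only [List.foldl_cons, hstep2] at hih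
      rw [hih, pvB_flush_eq]
      simp [List.filter_cons]
      constructor <;> split_ifs <;> simp

theorem pvRuns_ne_nil (cs : List Char) : ∀ r ∈ pvRuns cs, r ≠ [] := by
  induction cs using pvRuns.induct with
  | case1 => simp [pvRuns]
  | case2 c rest ih =>
    rw [pvRuns]
    intro r hr
    rcases List.mem_cons.1 hr with h | h
    · simp [h]
    · exact ih r h

theorem pv_filter_zero (cs : List Char) :
    ((pvRuns cs).filter (fun r => !PySem.Chars.isspace r.head!)).filter
        (fun r => PySem.Chars.startswith r ['0'])
      = (pvRuns cs).filter (fun r => r.head! == '0') := by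
  rw [List.filter_filter]
  apply List.filter_congr
  intro r hr
  cases r with
  | nil => exact absurd rfl (pvRuns_ne_nil cs [] hr)
  | cons x xs =>
    by_cases hx : x = '0'
    · subst hx; simp [PySem.Chars.startswith, List.isPrefixOf]; decide
    · simp [PySem.Chars.startswith, List.isPrefixOf,
        beq_eq_false_iff_ne.2 (Ne.symm hx), beq_eq_false_iff_ne.2 hx]

theorem pv_filter_one (cs : List Char) :
    ((pvRuns cs).filter (fun r => !PySem.Chars.isspace r.head!)).filter
        (fun r => PySem.Chars.startswith r ['1'])
      = (pvRuns cs).filter (fun r => r.head! == '1') := by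
  rw [List.filter_filter]
  apply List.filter_congr
  intro r hr
  cases r with
  | nil => exact absurd rfl (pvRuns_ne_nil cs [] hr)
  | cons x xs =>
    by_cases hx : x = '1'
    · subst hx; simp [PySem.Chars.startswith, List.isPrefixOf]; decide
    · simp [PySem.Chars.startswith, List.isPrefixOf,
        beq_eq_false_iff_ne.2 (Ne.symm hx), beq_eq_false_iff_ne.2 hx]

-- ===== VERDICT (by name: the statement is the Claim_ definition above) =====
theorem separate_subsequences_from_binary_string_spec : Claim_equal_separate_subsequences_from_binary_string := by
  intro s _
  unfold Spec_separate_subsequences_from_binary_string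
  unfold separate_subsequences_from_binary_string separate_subsequences_from_binary_string_alt
  have hA : PySem.Chars.split₀ (pvA_loop s.toList 0 []) =
      (pvRuns s.toList).filter (fun r => !PySem.Chars.isspace r.head!) := by
    rw [pvA_loop_eq_enc]
    simp only [List.drop_zero, List.nil_append]
    unfold PySem.Chars.split₀
    simpa using pv_split₀_enc s.toList []
  have hB := pvB_main s.toList [] []
  simp only [List.nil_append] at hB
  simp only [hA, hB, pv_filter_zero, pv_filter_one]
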